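-- pv_equiv track=rewrite | github.com/diwadd/sport | cc_modular_equation.py | count_pairs_fast
-- ===== SOURCE A (Python) =====
-- import math
--
-- def divisors(n):
--
--     sn = math.floor(math.sqrt(n))
--     d1 = []
--     d2 = []
--     for i in range(1, sn + 1):
--         if n % i == 0:
--             if n // i == i:
--                 d1.append(i)
--             else:
--                 d1.append(i)
--                 d2.append(n // i)
--
--     return d1 + d2[::-1]
--
-- def count_pairs_fast(n, m):
--
--     res = 0
--     for b in range(2, n+1):
--         y = m - m % b
--
--         if b <= m:
--
--             d = divisors(y)
--             index = 0
--             for i in range(len(d)):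
--                 if d[i] >= b:
--                     index = i
--                     break
--
--             res += index
--         else:
--             res += (b-1)
--
--     return res
-- ===== SOURCE B (Python) =====
-- import math
--
-- def count_pairs_fast(n, m):
--     res = 0
--     for b in range(2, n + 1):
--         if b <= m:
--             y = m - m % b
--             c = 0
--             for i in range(1, math.isqrt(y) + 1):
--                 if y % i == 0:
--                     if i < b:
--                         c += 1
--                     j = y // i
--                     if j != i and j < b:
--                         c += 1
--             res += c
--         else:
--             res += b - 1
--     return res
-- ===== Notes on version B (the rewrite author's own statement) =====
-- stated objective: simpler
-- what changed: B drops the divisors() helper entirely: instead of building the full sorted divisor list of y and scanning it for the first divisor >= b, B counts divisors of y below b inline in a single sqrt loop with an integer counter (checking i and y//i separately against b, avoiding double-counting on perfect squares).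
import Mathlib
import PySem

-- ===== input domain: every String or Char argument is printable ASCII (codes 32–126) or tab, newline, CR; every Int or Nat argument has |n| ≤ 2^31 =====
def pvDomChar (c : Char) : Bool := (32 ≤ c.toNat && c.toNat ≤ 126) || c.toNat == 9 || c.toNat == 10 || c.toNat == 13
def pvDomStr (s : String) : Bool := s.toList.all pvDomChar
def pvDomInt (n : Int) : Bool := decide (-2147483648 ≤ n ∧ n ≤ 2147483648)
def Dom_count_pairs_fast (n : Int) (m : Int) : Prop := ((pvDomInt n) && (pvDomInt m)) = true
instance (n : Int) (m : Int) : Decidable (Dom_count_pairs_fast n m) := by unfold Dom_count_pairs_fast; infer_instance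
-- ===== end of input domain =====

-- B replaces A's build-sorted-divisor-list-then-scan inner step by an inline sqrt-loop counter (simpler; same asymptotic cost).

-- ===== PORT A =====

-- loop body of divisors(): append i to d1, and n//i to d2 when it is a new divisor
def pvDivStep (nn : Int) (acc : List Int × List Int) (i : Int) : List Int × List Int :=
  if PySem.Int.mod nn i = 0 then
    if PySem.Int.floordiv nn i = i then (acc.1 ++ [i], acc.2)
    else (acc.1 ++ [i], acc.2 ++ [PySem.Int.floordiv nn i])
  else acc

-- math.floor(math.sqrt(nn)) is ported as Nat.sqrt; exact for the arguments divisors receives on Dom (2 ≤ nn ≤ 2^31)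
def divisors (nn : Int) : List Int :=
  let sn : Int := (Nat.sqrt nn.toNat : Int)
  let p := (PySem.List.pyRange 1 (sn + 1) 1).foldl (pvDivStep nn) ([], [])
  p.1 ++ p.2.reverse

-- 'index = 0; for i in range(len(d)): if d[i] >= b: index = i; break' as the obvious structural recursion
def pvFirstGeIdx (b : Int) : List Int → Int → Int
  | [], _ => 0
  | x :: xs, i => if b ≤ x then i else pvFirstGeIdx b xs (i + 1)

def count_pairs_fast (n : Int) (m : Int) : Int :=
  (PySem.List.pyRange 2 (n + 1) 1).foldl
    (fun res b =>
      let y := m - PySem.Int.mod m b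
      if b ≤ m then res + pvFirstGeIdx b (divisors y) 0
      else res + (b - 1)) 0

-- ===== PORT B =====

-- loop body of B's inner sqrt loop: count i and y//i against b
def pvCntStep (y b : Int) (c : Int) (i : Int) : Int :=
  if PySem.Int.mod y i = 0 then
    let c' := if i < b then c + 1 else c
    let j := PySem.Int.floordiv y i
    if j ≠ i ∧ j < b then c' + 1 else c'
  else c

def count_pairs_fast_alt (n : Int) (m : Int) : Int :=
  (PySem.List.pyRange 2 (n + 1) 1).foldl
    (fun res b =>
      if b ≤ m then
        let y := m - PySem.Int.mod m b
        res + (PySem.List.pyRange 1 ((Nat.sqrt y.toNat : Int) + 1) 1).foldl (pvCntStep y b) 0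
      else res + (b - 1)) 0

-- ===== PRECONDITION & SPEC =====
def Spec_count_pairs_fast (n : Int) (m : Int) (out : Int) : Prop := out = count_pairs_fast_alt n m
instance (n : Int) (m : Int) (out : Int) : Decidable (Spec_count_pairs_fast n m out) := by unfold Spec_count_pairs_fast; infer_instance

-- ===== CLAIM (what is proved, stated in full; the proofs are below) =====
def Claim_equal_count_pairs_fast : Prop := ∀ (n : Int) (m : Int), Dom_count_pairs_fast n m → Spec_count_pairs_fast n m (count_pairs_fast n m)

-- ===== LEMMAS AND PROOFS =====

-- the small-divisor list A's loop accumulates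
def pvD1 (y : Int) (R : List Int) : List Int := R.filter (fun i => decide (PySem.Int.mod y i = 0))
-- the large-divisor list A's loop accumulates
def pvD2 (y : Int) (R : List Int) : List Int :=
  (R.filter (fun i => decide (PySem.Int.mod y i = 0) && decide (PySem.Int.floordiv y i ≠ i))).map
    (fun i => PySem.Int.floordiv y i)

lemma divfold_eq (y : Int) (R : List Int) : ∀ (d1 d2 : List Int),
    R.foldl (pvDivStep y) (d1, d2) = (d1 ++ pvD1 y R, d2 ++ pvD2 y R) := by
  induction R with
  | nil => intro d1 d2; simp [pvD1, pvD2]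
  | cons i R ih =>
    intro d1 d2
    by_cases h1 : PySem.Int.mod y i = 0
    · by_cases h2 : PySem.Int.floordiv y i = i
      · simp [pvDivStep, h1, h2, pvD1, pvD2, ih]
      · simp [pvDivStep, h1, h2, pvD1, pvD2, ih]
    · simp [pvDivStep, h1, pvD1, pvD2, ih]

lemma cntfold_eq (y b : Int) (R : List Int) : ∀ (c : Int),
    R.foldl (pvCntStep y b) c =
      c + ((pvD1 y R).countP (fun x => decide (x < b)) : Int)
        + ((pvD2 y R).countP (fun x => decide (x < b)) : Int) := by
  induction R with
  | nil => intro c; simp [pvD1, pvD2]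
  | cons i R ih =>
    intro c
    by_cases h1 : PySem.Int.mod y i = 0
    · by_cases h2 : PySem.Int.floordiv y i = i
      · by_cases h3 : i < b
        all_goals simp [pvCntStep, h1, h2, h3, pvD1, pvD2, ih]
        all_goals omega
      · by_cases h3 : i < b <;> by_cases h4 : PySem.Int.floordiv y i < b
        all_goals simp [pvCntStep, h1, h2, h3, h4, pvD1, pvD2, ih]
        all_goals omega
    · simp [pvCntStep, h1, pvD1, pvD2, ih]

lemma firstGeIdx_eq_takeWhile (b : Int) : ∀ (l : List Int) (i : Int),
    (∃ x ∈ l, b ≤ x) →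
    pvFirstGeIdx b l i = i + ((l.takeWhile (fun x => decide (x < b))).length : Int) := by
  intro l
  induction l with
  | nil => intro i h; simp at h
  | cons x xs ih =>
    intro i h
    by_cases hx : b ≤ x
    · simp [pvFirstGeIdx, hx, show ¬ x < b by omega]
    · have hex : ∃ z ∈ xs, b ≤ z := by
        rcases h with ⟨z, hz, hbz⟩
        rcases List.mem_cons.mp hz with rfl | hz'
        · omega
        · exact ⟨z, hz', hbz⟩
      simp only [pvFirstGeIdx, if_neg hx, List.takeWhile_cons,
        show decide (x < b) = true by simp; omega]
      rw [ih (i + 1) hex]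
      simp; omega

lemma takeWhile_length_eq_countP (b : Int) : ∀ (l : List Int),
    l.Pairwise (· < ·) →
    ((l.takeWhile (fun x => decide (x < b))).length : Int) = (l.countP (fun x => decide (x < b)) : Int) := by
  intro l
  induction l with
  | nil => simp
  | cons x xs ih =>
    intro hp
    rcases List.pairwise_cons.mp hp with ⟨hall, htail⟩
    by_cases hx : x < b
    · simp [hx, ih htail]
    · have hz : List.countP (fun x => decide (x < b)) (x :: xs) = 0 := by
        apply List.countP_eq_zero.mpr
        intro z hz
        rcases List.mem_cons.mp hz with rfl | hz'
        · simpa using hx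
        · have := hall z hz'; simp; omega
      rw [hz, List.takeWhile_cons_of_neg (by simpa using hx)]
      simp

lemma exact_div (y i : Int) (hi : 0 < i) (h : PySem.Int.mod y i = 0) :
    i * PySem.Int.floordiv y i = y := by
  have hdvd : i ∣ y := (PySem.Int.mod_eq_zero_iff_dvd y i).mp h
  rw [PySem.Int.floordiv_eq_ediv_of_pos hi]
  exact Int.mul_ediv_cancel' hdvd

lemma sqrt_le (y : Int) (hy : 0 ≤ y) :
    ((Nat.sqrt y.toNat : Int)) * ((Nat.sqrt y.toNat : Int)) ≤ y := by
  have h : ((Nat.sqrt y.toNat : Int)) ^ 2 ≤ ((y.toNat : Nat) : Int) := by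
    exact_mod_cast Nat.sqrt_le' y.toNat
  rw [Int.toNat_of_nonneg hy] at h
  nlinarith

lemma lt_succ_sqrt (y : Int) (hy : 0 ≤ y) :
    y < ((Nat.sqrt y.toNat : Int) + 1) * ((Nat.sqrt y.toNat : Int) + 1) := by
  have h : ((y.toNat : Nat) : Int) < ((Nat.sqrt y.toNat : Int) + 1) ^ 2 := by
    exact_mod_cast Nat.lt_succ_sqrt' y.toNat
  rw [Int.toNat_of_nonneg hy] at h
  nlinarith

-- every element of pvD2 over [1..sn] is y // i for some i in [1, sn] dividing y, with y // i ≠ i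
lemma mem_pvD2 (y : Int) (sn : Int) (z : Int)
    (hz : z ∈ pvD2 y (PySem.List.pyRange 1 (sn + 1) 1)) :
    ∃ i, 1 ≤ i ∧ i ≤ sn ∧ PySem.Int.mod y i = 0 ∧ z = PySem.Int.floordiv y i ∧ z ≠ i := by
  simp only [pvD2, List.mem_map, List.mem_filter, PySem.List.mem_pyRange_one] at hz
  rcases hz with ⟨i, ⟨⟨hi1, hi2⟩, hpred⟩, rfl⟩
  simp at hpred
  exact ⟨i, hi1, by omega, hpred.1, rfl, hpred.2⟩

-- a cofactor z of a divisor i ≤ sn with z ≠ i lies strictly above sn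
lemma cofactor_gt (y i z sn : Int) (hy : 2 ≤ y) (hi1 : 1 ≤ i) (hi2 : i ≤ sn)
    (hiz : i * z = y) (hne : z ≠ i) (hsq : sn * sn ≤ y) : sn < z := by
  have hsn1 : 1 ≤ sn := le_trans hi1 hi2
  have h1 : i * sn ≤ y := by nlinarith
  have hzpos : 0 < z := by nlinarith
  have hle : sn ≤ z := le_of_mul_le_mul_left (by nlinarith) (by omega)
  rcases lt_or_eq_of_le hle with h | h
  · exact h
  · exfalso
    rw [← h] at hiz
    have hisn : sn ≤ i := le_of_mul_le_mul_right (by nlinarith) (by omega)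
    exact hne (by omega)

lemma pvD2_gt_sn (y sn : Int) (hy : 2 ≤ y) (hsq : sn * sn ≤ y) (z : Int)
    (hz : z ∈ pvD2 y (PySem.List.pyRange 1 (sn + 1) 1)) : sn < z := by
  rcases mem_pvD2 y sn z hz with ⟨i, hi1, hi2, hmod, rfl, hne⟩
  exact cofactor_gt y i _ sn hy hi1 hi2 (exact_div y i (by omega) hmod) hne hsq

lemma pvD_pairwise (y sn : Int) (hy : 2 ≤ y) (hsq : sn * sn ≤ y) :
    (pvD1 y (PySem.List.pyRange 1 (sn + 1) 1) ++
      (pvD2 y (PySem.List.pyRange 1 (sn + 1) 1)).reverse).Pairwise (· < ·) := by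
  rw [List.pairwise_append]
  refine ⟨?_, ?_, ?_⟩
  · exact (PySem.List.pairwise_lt_pyRange_one 1 (sn + 1)).filter _
  · rw [List.pairwise_reverse]
    rw [pvD2, List.pairwise_map]
    have hpf : ((PySem.List.pyRange 1 (sn + 1) 1).filter
        (fun i => decide (PySem.Int.mod y i = 0) && decide (PySem.Int.floordiv y i ≠ i))).Pairwise (· < ·) :=
      (PySem.List.pairwise_lt_pyRange_one 1 (sn + 1)).filter _
    refine List.Pairwise.imp_of_mem ?_ hpf
    intro a c ha hc hac
    simp only [List.mem_filter, PySem.List.mem_pyRange_one, Bool.and_eq_true, decide_eq_true_eq] at ha hc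
    have hda : a * PySem.Int.floordiv y a = y := exact_div y a (by omega) ha.2.1
    have hdc : c * PySem.Int.floordiv y c = y := exact_div y c (by omega) hc.2.1
    have hqa : 0 < PySem.Int.floordiv y a := by nlinarith [ha.1.1]
    have hqc : 0 < PySem.Int.floordiv y c := by nlinarith [hc.1.1]
    nlinarith [ha.1.1, hc.1.1]
  · intro x hx z hz
    have hx' : x ≤ sn := by
      simp only [pvD1, List.mem_filter, PySem.List.mem_pyRange_one] at hx
      omega
    have := pvD2_gt_sn y sn hy hsq z (List.mem_reverse.mp hz)
    omega

lemma pvD_exists_ge (y b sn : Int) (hb : 2 ≤ b) (hdvd : b ∣ y) (hyb : b ≤ y)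
    (hsq : sn * sn ≤ y) (hlt : y < (sn + 1) * (sn + 1)) :
    ∃ x ∈ pvD1 y (PySem.List.pyRange 1 (sn + 1) 1) ++
      (pvD2 y (PySem.List.pyRange 1 (sn + 1) 1)).reverse, b ≤ x := by
  have hmodb : PySem.Int.mod y b = 0 := (PySem.Int.mod_eq_zero_iff_dvd y b).mpr hdvd
  by_cases hbs : b ≤ sn
  · refine ⟨b, List.mem_append_left _ ?_, le_refl b⟩
    simp only [pvD1, List.mem_filter, PySem.List.mem_pyRange_one, decide_eq_true_eq]
    exact ⟨⟨by omega, by omega⟩, hmodb⟩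
  · -- b > sn: the cofactor c = y // b lies in [1, sn] and y // c = b
    push Not at hbs
    rcases hdvd with ⟨c, hc⟩
    have hcpos : 1 ≤ c := by nlinarith
    have hcsn : c ≤ sn := by nlinarith
    have hmodc : PySem.Int.mod y c = 0 := (PySem.Int.mod_eq_zero_iff_dvd y c).mpr ⟨b, by rw [hc]; ring⟩
    have hfc : PySem.Int.floordiv y c = b := by
      rw [PySem.Int.floordiv_eq_ediv_of_pos (show (0:Int) < c by omega), hc]
      exact Int.mul_ediv_cancel _ (by omega)
    refine ⟨b, List.mem_append_right _ ?_, le_refl b⟩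
    rw [List.mem_reverse]
    simp only [pvD2, List.mem_map, List.mem_filter, PySem.List.mem_pyRange_one,
      Bool.and_eq_true, decide_eq_true_eq]
    exact ⟨c, ⟨⟨by omega, by omega⟩, hmodc, by rw [hfc]; omega⟩, hfc⟩

-- the per-b inner equality: A's scan over divisors(y) equals B's inline count
lemma inner_eq (y b : Int) (hb : 2 ≤ b) (hdvd : b ∣ y) (hyb : b ≤ y) :
    pvFirstGeIdx b (divisors y) 0 =
      (PySem.List.pyRange 1 ((Nat.sqrt y.toNat : Int) + 1) 1).foldl (pvCntStep y b) 0 := by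
  have hy : 2 ≤ y := by omega
  have hsq := sqrt_le y (by omega)
  have hlt := lt_succ_sqrt y (by omega)
  have hdiv : divisors y = pvD1 y (PySem.List.pyRange 1 ((Nat.sqrt y.toNat : Int) + 1) 1) ++
      (pvD2 y (PySem.List.pyRange 1 ((Nat.sqrt y.toNat : Int) + 1) 1)).reverse := by
    simp only [divisors, divfold_eq]
    simp
  rw [hdiv, cntfold_eq]
  rw [firstGeIdx_eq_takeWhile b _ 0 (pvD_exists_ge y b _ hb hdvd hyb hsq hlt)]
  rw [takeWhile_length_eq_countP b _ (pvD_pairwise y _ hy hsq)]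
  simp [List.countP_append]

theorem count_pairs_fast_eq (n m : Int) : count_pairs_fast n m = count_pairs_fast_alt n m := by
  unfold count_pairs_fast count_pairs_fast_alt
  apply PySem.List.foldl_congr_mem
  intro res b hb
  rw [PySem.List.mem_pyRange_one] at hb
  by_cases hbm : b ≤ m
  · simp only [if_pos hbm]
    set y : Int := m - PySem.Int.mod m b with hy
    have hbpos : 0 < b := by omega
    have hmod : PySem.Int.mod m b = m % b := PySem.Int.mod_eq_emod_of_pos hbpos
    have hdvd : b ∣ y := by
      rw [hy, hmod, Int.emod_def]; exact ⟨m / b, by ring⟩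
    have hyb : b ≤ y := by
      have h1 : 0 ≤ m % b := Int.emod_nonneg m (by omega)
      have h2 : m % b < b := Int.emod_lt_of_pos m hbpos
      have hypos : 0 < y := by rw [hy, hmod]; omega
      rcases hdvd with ⟨k, hk⟩
      have : 1 ≤ k := by nlinarith
      nlinarith
    rw [inner_eq y b (by omega) hdvd hyb]
  · simp [hbm]

-- ===== VERDICT (by name: the statement is the Claim_ definition above) =====
theorem count_pairs_fast_spec : Claim_equal_count_pairs_fast := by
  intro n m _
  unfold Spec_count_pairs_fast
  exact count_pairs_fast_eq n m
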